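-- pv_equiv track=rewrite | github.com/edoardottt/programming-fundamentals | Workbook/Strings/Strings_23/program.py | es17
-- ===== SOURCE A (Python) =====
-- def es17(ls, k):
--     """
--     Es 7: 6 punti
--     progettare la funzione es17(ls,k) che:
--     - riceve  in input una lista di parole ls ed un intero k
--     - cancella da ls le parole che contengono almeno k  caratteri uguali (sia in maiuscolo che in minuscolo)
--     - restituisce il numero di parole cancellate da ls.
--     Nota che al termine della funzione la lista passata come parametro deve risultare modificata
--     (ricorda che le liste sono mutabili).
--      ESEMPI:
--      Se ls=[ 'ananas', 'pera', 'banana', 'melone', 'kiwi','albicocca'] e k=3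
--      la funzione restituisce 3 e la lista ls diventa ['pera', 'melone', 'kiwi']
--      Se ls=[ 'Angelo', 'Andrea', 'Osvaldo', 'Anna', 'Monica', 'Adele'] e k=2
--      la funzione restituisce 4 e la lista ls diventa ['Angelo', 'Monica']
--     """
--     res = []
--     lenn = len(ls)
--     for elem in ls:
--         if good(elem.lower(), k):
--             res.append(elem)
--     ls.clear()
--     ls.extend(res)
--     return lenn - len(res)
--
-- def good(elem, k):
--     for item in set(elem):
--         if elem.count(item) >= k:
--             return False
--     return True
-- ===== SOURCE B (Python) =====
-- def es17(ls, k):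
--     survivors = [w for w in ls if not _has_run(w, k)]
--     removed = len(ls) - len(survivors)
--     ls[:] = survivors
--     return removed
--
-- def _has_run(w, k):
--     # True iff some run of equal chars in sorted(w.lower()) has length >= k
--     run = 1
--     prev = None
--     for c in sorted(w.lower()):
--         if c == prev:
--             run += 1
--         else:
--             run = 1
--             prev = c
--         if run >= k:
--             return True
--     return False
-- ===== Notes on version B (the rewrite author's own statement) =====
-- stated objective: alternative
-- what changed: A counts each distinct character of the lowered word with repeated str.count scans; B sorts the lowered word once and walks it tracking run lengths of equal characters, removing a word as soon as a run reaches k.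
import Mathlib
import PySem

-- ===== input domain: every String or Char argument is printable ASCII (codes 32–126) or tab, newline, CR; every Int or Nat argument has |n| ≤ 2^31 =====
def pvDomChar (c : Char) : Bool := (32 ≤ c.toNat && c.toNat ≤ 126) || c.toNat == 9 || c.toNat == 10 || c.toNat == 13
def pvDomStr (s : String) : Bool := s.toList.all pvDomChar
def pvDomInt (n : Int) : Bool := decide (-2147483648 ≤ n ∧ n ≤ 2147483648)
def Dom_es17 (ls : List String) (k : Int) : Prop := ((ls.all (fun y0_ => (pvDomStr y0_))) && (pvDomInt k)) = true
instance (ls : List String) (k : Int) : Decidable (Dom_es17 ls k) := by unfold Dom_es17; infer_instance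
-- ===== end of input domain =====

-- B replaces A's per-distinct-character count scans by a single sort of the lowered word
-- followed by a run-length walk; equivalence is about the RETURN value (both Pythons also
-- leave ls holding exactly the surviving words, in order).

-- ===== PORT A =====
-- 'for item in set(elem): if elem.count(item) >= k: return False' (result is order-independent)
def goodLoop (elem : List Char) (k : Int) : List Char → Bool
  | [] => true
  | item :: rest => if k ≤ (elem.count item : Int) then false else goodLoop elem k rest

def good (elem : List Char) (k : Int) : Bool :=
  goodLoop elem k (PySem.Set.ofList elem)

def es17 (ls : List String) (k : Int) : Int :=
  let res := ls.foldl (fun res elem =>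
    if good (PySem.Str.lower elem).toList k then res ++ [elem] else res) []
  let lenn : Int := ls.length
  lenn - (res.length : Int)

-- ===== PORT B =====
-- run-length walk over the sorted, lowered characters
def runScan (k : Int) : List Char → Option Char → Int → Bool
  | [], _, _ => false
  | c :: rest, prev, run =>
    let run' := if prev = some c then run + 1 else 1
    if k ≤ run' then true else runScan k rest (some c) run'

def hasRun (w : String) (k : Int) : Bool :=
  runScan k (PySem.List.sorted (PySem.Str.lower w).toList (fun c => c) false) none 1

def es17_alt (ls : List String) (k : Int) : Int :=
  let survivors := ls.filter (fun w => !hasRun w k)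
  (ls.length : Int) - (survivors.length : Int)

-- ===== PRECONDITION & SPEC =====
def Spec_es17 (ls : List String) (k : Int) (out : Int) : Prop := out = es17_alt ls k
instance (ls : List String) (k : Int) (out : Int) : Decidable (Spec_es17 ls k out) := by unfold Spec_es17; infer_instance

-- ===== CLAIM (what is proved, stated in full; the proofs are below) =====
def Claim_equal_es17 : Prop := ∀ (ls : List String) (k : Int), Dom_es17 ls k → Spec_es17 ls k (es17 ls k)

-- ===== LEMMAS AND PROOFS =====

-- A's inner loop returns false iff some visited character reaches count k
lemma goodLoop_eq_false_iff (elem : List Char) (k : Int) (l : List Char) :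
    goodLoop elem k l = false ↔ ∃ c ∈ l, k ≤ (elem.count c : Int) := by
  induction l with
  | nil => simp [goodLoop]
  | cons item rest ih =>
    by_cases h : k ≤ (elem.count item : Int)
    · simp [goodLoop, h]
    · simp [goodLoop, h, ih]

-- B's run-length walk, on a sorted suffix, detects exactly 'some char reaches count k'
-- (the carried run counts previously consumed copies of prev)
lemma runScan_spec (k : Int) (l : List Char) (prev : Option Char) (run : Int)
    (hs : l.Pairwise (· ≤ ·)) (hp : ∀ p, prev = some p → ∀ x ∈ l, p ≤ x) :
    runScan k l prev run = true ↔
      ∃ c ∈ l, k ≤ (if prev = some c then run else 0) + (l.count c : Int) := by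
  induction l generalizing prev run with
  | nil => simp [runScan]
  | cons c rest ih =>
    have hs' : rest.Pairwise (· ≤ ·) := hs.tail
    have hcle : ∀ x ∈ rest, c ≤ x := fun x hx => (List.pairwise_cons.mp hs).1 x hx
    have hcc : (((c :: rest).count c : Nat) : Int) = (rest.count c : Int) + 1 := by
      simp [List.count_cons_self]
    have hcne : ∀ d : Char, d ≠ c → (((c :: rest).count d : Nat) : Int) = (rest.count d : Int) := by
      intro d hdc
      simp [List.count_cons_of_ne (Ne.symm hdc)]
    simp only [runScan]
    by_cases hret : k ≤ (if prev = some c then run + 1 else 1)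
    · simp only [if_pos hret]
      constructor
      · intro _
        refine ⟨c, List.mem_cons_self, ?_⟩
        by_cases hpc : prev = some c
        · simp only [if_pos hpc] at hret ⊢
          rw [hcc]
          have : (0 : Int) ≤ (rest.count c : Int) := by positivity
          omega
        · simp only [if_neg hpc] at hret ⊢
          rw [hcc]
          have : (0 : Int) ≤ (rest.count c : Int) := by positivity
          omega
      · intro _; trivial
    · simp only [if_neg hret]
      rw [ih (some c) _ hs' (by rintro p hpeq x hx; cases hpeq; exact hcle x hx)]
      constructor
      · rintro ⟨d, hd, hkd⟩
        refine ⟨d, List.mem_cons_of_mem _ hd, ?_⟩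
        by_cases hdc : d = c
        · subst hdc
          have hkd' : k ≤ (if prev = some d then run + 1 else 1) + (rest.count d : Int) := by
            simpa using hkd
          rw [hcc]
          by_cases hpc : prev = some d
          · rw [if_pos hpc] at hkd' ⊢; omega
          · rw [if_neg hpc] at hkd' ⊢; omega
        · have hne : ¬ ((some c : Option Char) = some d) := by
            simpa using Ne.symm hdc
          rw [if_neg hne] at hkd
          have hdp : ¬ (prev = some d) := by
            intro hpeq
            have hcd : c ≤ d := hcle d hd
            have hdc' : d ≤ c := hp d hpeq c List.mem_cons_self
            exact hdc (le_antisymm hdc' hcd)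
          rw [if_neg hdp, hcne d hdc]
          omega
      · rintro ⟨d, hd, hkd⟩
        by_cases hdc : d = c
        · subst hdc
          rw [hcc] at hkd
          by_cases hdin : d ∈ rest
          · refine ⟨d, hdin, ?_⟩
            rw [if_pos rfl]
            by_cases hpc : prev = some d
            · rw [if_pos hpc] at hkd hret ⊢; omega
            · rw [if_neg hpc] at hkd hret ⊢; omega
          · exfalso
            have hc0 : rest.count d = 0 := List.count_eq_zero.mpr hdin
            rw [hc0] at hkd
            by_cases hpc : prev = some d
            · rw [if_pos hpc] at hkd hret; omega
            · rw [if_neg hpc] at hkd hret; omega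
        · have hdrest : d ∈ rest := by
            rcases List.mem_cons.mp hd with h | h
            · exact absurd h hdc
            · exact h
          refine ⟨d, hdrest, ?_⟩
          have hne : ¬ ((some c : Option Char) = some d) := by
            simpa using Ne.symm hdc
          have hdp : ¬ (prev = some d) := by
            intro hpeq
            have hcd : c ≤ d := hcle d hdrest
            have hdc' : d ≤ c := hp d hpeq c List.mem_cons_self
            exact hdc (le_antisymm hdc' hcd)
          rw [if_neg hne]
          rw [if_neg hdp, hcne d hdc] at hkd
          omega

-- per-word agreement: A keeps a word iff B does
lemma good_eq_not_hasRun (w : String) (k : Int) :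
    good (PySem.Str.lower w).toList k = ! hasRun w k := by
  set lc := (PySem.Str.lower w).toList with hlc
  set sl := PySem.List.sorted lc (fun c => c) false with hsl
  have hperm : sl.Perm lc := PySem.List.sorted_perm lc (fun c => c) false
  have hpw : sl.Pairwise (· ≤ ·) := by
    simpa using PySem.List.sorted_pairwise lc (fun c => c)
  have hrun : hasRun w k = true ↔ ∃ c ∈ lc, k ≤ (lc.count c : Int) := by
    unfold hasRun
    rw [← hsl, runScan_spec k sl none 1 hpw (by simp)]
    constructor
    · rintro ⟨c, hc, hkc⟩
      exact ⟨c, hperm.mem_iff.mp hc, by simpa [hperm.count_eq] using hkc⟩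
    · rintro ⟨c, hc, hkc⟩
      exact ⟨c, hperm.mem_iff.mpr hc, by simpa [hperm.count_eq] using hkc⟩
  have hgood : good lc k = false ↔ ∃ c ∈ lc, k ≤ (lc.count c : Int) := by
    unfold good
    rw [goodLoop_eq_false_iff]
    constructor
    · rintro ⟨c, hc, hkc⟩; exact ⟨c, (PySem.Set.mem_ofList _ _).mp hc, hkc⟩
    · rintro ⟨c, hc, hkc⟩; exact ⟨c, (PySem.Set.mem_ofList _ _).mpr hc, hkc⟩
  cases hg : good lc k
  · have hb : hasRun w k = true := hrun.mpr (hgood.mp hg)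
    simp [hb]
  · have hno : ¬ ∃ c ∈ lc, k ≤ (lc.count c : Int) := by
      intro h
      rw [hgood.mpr h] at hg
      exact Bool.false_ne_true hg
    have hb : hasRun w k = false := by
      cases hb' : hasRun w k
      · rfl
      · exact absurd (hrun.mp hb') hno
    simp [hb]

-- ===== VERDICT (by name: the statement is the Claim_ definition above) =====
theorem es17_spec : Claim_equal_es17 := by
  intro ls k _
  unfold Spec_es17 es17 es17_alt
  rw [PySem.List.foldl_append_if_eq_filter]
  simp only [List.nil_append]
  have : (fun elem => good (PySem.Str.lower elem).toList k)
       = (fun w => ! hasRun w k) := funext fun w => good_eq_not_hasRun w k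
  rw [this]
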